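-- pv_equiv track=rewrite | github.com/kaushiknk98/Decision_Tree_From_The_Scratch | DecisionTree.py | label_counts
-- ===== SOURCE A (Python) =====
-- def label_counts(rows):
--     """Counts the number of each type of example in a dataset."""
--     counts = {}  # a dictionary of label -> count.
--     for row in rows:
--         # in our dataset format, the label is always the last column
--         label = row[-1]
--         if label not in counts:
--             counts[label] = 0
--         counts[label] += 1
--
--     s = sorted(counts, key=counts.__getitem__, reverse=True)
--     return s[0]
-- ===== SOURCE B (Python) =====
-- def label_counts(rows):
--     labels = [row[-1] for row in rows]
--     return max(dict.fromkeys(labels), key=labels.count)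
-- ===== Notes on version B (the rewrite author's own statement) =====
-- stated objective: simpler
-- what changed: B drops A's counting dict and sort entirely: it collects the last-column labels once, dedups them in first-appearance order with dict.fromkeys, and returns max(distinct, key=labels.count), which picks the same first-inserted label of maximal count as A's stable reverse sort followed by [0].
import Mathlib
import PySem

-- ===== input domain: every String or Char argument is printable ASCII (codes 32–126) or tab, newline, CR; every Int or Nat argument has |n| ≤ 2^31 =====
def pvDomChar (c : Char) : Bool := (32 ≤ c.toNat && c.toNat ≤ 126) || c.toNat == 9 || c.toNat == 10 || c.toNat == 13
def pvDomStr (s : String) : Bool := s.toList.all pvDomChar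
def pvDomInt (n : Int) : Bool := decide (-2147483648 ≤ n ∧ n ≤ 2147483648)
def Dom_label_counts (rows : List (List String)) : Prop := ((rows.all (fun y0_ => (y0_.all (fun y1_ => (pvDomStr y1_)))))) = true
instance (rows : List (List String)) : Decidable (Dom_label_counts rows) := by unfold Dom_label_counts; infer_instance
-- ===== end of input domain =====

-- B is simpler: no counting dict — it lists the last-column labels once, dedups them in
-- first-appearance order, and takes max(..., key=labels.count), which (like A's stable
-- reverse sort followed by [0]) returns the first-inserted label of maximal count.

-- ===== PORT A =====
-- label = row[-1] (PySem.List.pyGet?; the none/IndexError case is excluded by Pre_) is written inline;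
-- 'if label not in counts: counts[label] = 0' then 'counts[label] += 1' are the two dict steps.
def label_counts_loop (rows : List (List String)) : PySem.Dict String Int :=
  rows.foldl (fun d row =>
      (if d.contains ((PySem.List.pyGet? row (-1)).getD "") then d
       else d.insert ((PySem.List.pyGet? row (-1)).getD "") 0).insert
        ((PySem.List.pyGet? row (-1)).getD "")
        ((if d.contains ((PySem.List.pyGet? row (-1)).getD "") then d
          else d.insert ((PySem.List.pyGet? row (-1)).getD "") 0).getD
          ((PySem.List.pyGet? row (-1)).getD "") 0 + 1)) PySem.Dict.empty

def label_counts (rows : List (List String)) : String :=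
  (PySem.List.pyGet?   -- s[0]; none (IndexError, empty rows) excluded by Pre_
    (PySem.List.sorted (label_counts_loop rows).keys
      (fun k => (label_counts_loop rows).getD k 0) true) 0).getD ""

-- ===== PORT B =====
def label_counts_alt (rows : List (List String)) : String :=
  let labels := rows.map (fun row => (PySem.List.pyGet? row (-1)).getD "")   -- row[-1]; Pre_ excludes the none case
  (PySem.List.max? (PySem.List.dedup labels) (fun l => (labels.count l : Int))).getD ""   -- max raises on empty; excluded by Pre_

-- ===== PRECONDITION & SPEC =====
-- Pre_ excludes exactly the inputs where Python A raises IndexError: empty rows (s[0]) and any empty row (row[-1]).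
def Pre_label_counts (rows : List (List String)) : Prop :=
  rows ≠ [] ∧ ∀ row ∈ rows, row ≠ []
instance (rows : List (List String)) : Decidable (Pre_label_counts rows) := by unfold Pre_label_counts; infer_instance

def pvWitness_label_counts : List (List String) := [["1", "a"], ["2", "b"], ["3", "a"]]

def Spec_label_counts (rows : List (List String)) (out : String) : Prop := out = label_counts_alt rows
instance (rows : List (List String)) (out : String) : Decidable (Spec_label_counts rows out) := by unfold Spec_label_counts; infer_instance

-- ===== CLAIM (what is proved, stated in full; the proofs are below) =====
def Claim_equal_label_counts : Prop := ∀ (rows : List (List String)), Dom_label_counts rows → Pre_label_counts rows → Spec_label_counts rows (label_counts rows)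

-- ===== LEMMAS AND PROOFS =====

-- A's per-row dict update ('if label not in counts: counts[label]=0; counts[label]+=1')
-- is the plain counting insert.
theorem pv_stepA_eq (d : PySem.Dict String Int) (l : String) :
    (if d.contains l then d else d.insert l 0).insert l
      ((if d.contains l then d else d.insert l 0).getD l 0 + 1) = d.insert l (d.getD l 0 + 1) := by
  by_cases h : d.contains l
  · simp [h]
  · simp only [h, Bool.false_eq_true, if_false]
    rw [PySem.Dict.getD_insert_self, PySem.Dict.insert_insert_self,
        PySem.Dict.getD_of_not_contains d 0 (by simpa using h)]

-- head of Python's stable reverse sort = Python's max (first extremal element)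
theorem pv_head_sorted_rev_eq_max? {α : Type} (key : α → Int) (xs : List α) :
    (PySem.List.sorted xs key true).head? = PySem.List.max? xs key := by
  induction xs using List.reverseRecOn with
  | nil => rfl
  | append_singleton xs x ih =>
    simp only [PySem.List.sorted, PySem.List.max?, reduceIte, List.foldl_append, List.foldl_cons,
      List.foldl_nil] at *
    cases hs : List.foldl (fun acc x =>
        PySem.List.insertBy (fun a b => decide (key b < key a)) x acc) [] xs with
    | nil =>
      rw [hs] at ih
      simp [PySem.List.insertBy, ← ih]
    | cons m t =>
      rw [hs] at ih
      simp only [PySem.List.insertBy, ← ih, List.head?_cons]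
      by_cases h : key m < key x
      · simp [h]
      · simp [h]

-- A's counting loop over rows is Counter of the last-column labels
theorem pv_fold_eq (rows : List (List String)) :
    rows.foldl (fun d row => d.insert ((PySem.List.pyGet? row (-1)).getD "")
        (d.getD ((PySem.List.pyGet? row (-1)).getD "") 0 + 1)) PySem.Dict.empty
      = PySem.Dict.counter (rows.map (fun row => (PySem.List.pyGet? row (-1)).getD "")) := by
  rw [← PySem.Dict.foldl_insert_getD_add_one_eq_counter, List.foldl_map]

theorem pv_pyGet_zero_eq_head? {α : Type} (l : List α) : PySem.List.pyGet? l 0 = l.head? := by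
  cases l <;> simp [PySem.List.pyGet?, PySem.List.pyIdx?]

theorem label_counts_spec : Claim_equal_label_counts := by
  intro rows _ _
  unfold Spec_label_counts label_counts label_counts_alt label_counts_loop
  simp only [pv_stepA_eq, pv_fold_eq, PySem.Dict.getD_counter, PySem.Dict.keys_counter,
    PySem.List.dedup_eq_ofList, pv_pyGet_zero_eq_head?, pv_head_sorted_rev_eq_max?]
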